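-- pv_equiv track=rewrite | github.com/chris-khan-1/advent_of_code_public | src/aoc_2015/day_05/aoc_2015_05_solution.py | three_vowels_exist
-- ===== SOURCE A (Python) =====
-- def three_vowels_exist(input: str) -> bool:
--     vowels = ["a", "e", "i", "o", "u"]
--     vowel_count = 0
--     for letter in input:
--         if letter in vowels:
--             vowel_count += 1
--             if vowel_count >= 3:
--                 return True
--     return False
-- ===== SOURCE B (Python) =====
-- def three_vowels_exist(input: str) -> bool:
--     return sum(input.count(v) for v in "aeiou") >= 3
-- ===== Notes on version B (the rewrite author's own statement) =====
-- stated objective: idiomatic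
-- what changed: Replaces the early-exit counter loop over the input with a single expression that scans the whole string once per vowel via str.count and thresholds the total at 3.
import Mathlib
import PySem

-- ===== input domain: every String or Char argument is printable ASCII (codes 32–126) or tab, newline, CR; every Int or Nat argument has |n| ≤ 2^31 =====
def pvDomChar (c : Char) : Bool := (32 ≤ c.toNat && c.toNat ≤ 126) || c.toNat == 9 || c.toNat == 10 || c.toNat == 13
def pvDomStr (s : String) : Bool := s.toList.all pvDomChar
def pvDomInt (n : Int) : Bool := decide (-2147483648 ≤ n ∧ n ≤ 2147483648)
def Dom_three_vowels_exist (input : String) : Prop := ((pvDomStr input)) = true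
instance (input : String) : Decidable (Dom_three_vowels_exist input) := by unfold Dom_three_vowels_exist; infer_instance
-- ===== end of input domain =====

-- B replaces A's early-exit counter loop over the input with a per-vowel str.count sum thresholded at 3 (idiomatic one-liner).
-- ===== PORT A =====
-- A: count vowels left to right, returning True as soon as the counter reaches 3.
def pvVowels : List Char := ['a', 'e', 'i', 'o', 'u']

def pvALoop : List Char → Int → Bool
  | [], _ => false
  | letter :: rest, vowel_count =>
    if letter ∈ pvVowels then
      if vowel_count + 1 ≥ 3 then true
      else pvALoop rest (vowel_count + 1)
    else pvALoop rest vowel_count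

def three_vowels_exist (input : String) : Bool := pvALoop input.toList 0

-- ===== PORT B =====
-- B: sum(input.count(v) for v in "aeiou") >= 3
def three_vowels_exist_alt (input : String) : Bool :=
  decide (3 ≤ ((String.toList "aeiou").map (fun v => PySem.Str.count input (String.ofList [v]))).sum)

-- ===== PRECONDITION & SPEC =====
def Spec_three_vowels_exist (input : String) (out : Bool) : Prop := out = three_vowels_exist_alt input
instance (input : String) (out : Bool) : Decidable (Spec_three_vowels_exist input out) := by unfold Spec_three_vowels_exist; infer_instance

-- ===== CLAIM (what is proved, stated in full; the proofs are below) =====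
def Claim_equal_three_vowels_exist : Prop := ∀ (input : String), Dom_three_vowels_exist input → Spec_three_vowels_exist input (three_vowels_exist input)

-- ===== LEMMAS AND PROOFS =====

-- single-character Python str.count is the list count of that character
lemma count_go_singleton (c : Char) (l : List Char) (fuel : Nat) (acc : Nat)
    (h : l.length ≤ fuel) :
    PySem.Chars.count.go [c] fuel l acc = acc + l.count c := by
  induction l generalizing fuel acc with
  | nil => cases fuel <;> simp [PySem.Chars.count.go]
  | cons hd t ih =>
    cases fuel with
    | zero => simp at h
    | succ f =>
      simp only [List.length_cons, Nat.succ_le_succ_iff] at h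
      by_cases hc : c = hd
      · subst hc
        simp [PySem.Chars.count.go, List.isPrefixOf, ih _ _ h]
        omega
      · have hp : ([c].isPrefixOf (hd :: t)) = false := by
          simp [List.isPrefixOf]
          intro hh; exact hc hh
        simp [PySem.Chars.count.go, hp, ih _ _ h, List.count_cons]
        exact fun hh => hc hh.symm

lemma count_singleton (c : Char) (l : List Char) :
    PySem.Chars.count l [c] = l.count c := by
  simp [PySem.Chars.count, count_go_singleton c l l.length 0 le_rfl]

-- A's loop (counter still below 3) decides whether counter + remaining vowels reaches 3
lemma pvALoop_eq (l : List Char) (c : Int) (hc : c < 3) :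
    pvALoop l c = decide (3 ≤ c +
      ((l.count 'a' + l.count 'e' + l.count 'i' + l.count 'o' + l.count 'u' : Nat) : Int)) := by
  induction l generalizing c with
  | nil => simp [pvALoop]; omega
  | cons h t ih =>
    by_cases hv : h ∈ pvVowels
    · by_cases h3 : c + 1 ≥ 3
      · fin_cases hv <;> simp [pvALoop, pvVowels, h3] <;> omega
      · have ht := ih (c + 1) (by omega)
        fin_cases hv <;> simp [pvALoop, pvVowels, h3, ht] <;> omega
    · have hne : h ≠ 'a' ∧ h ≠ 'e' ∧ h ≠ 'i' ∧ h ≠ 'o' ∧ h ≠ 'u' := by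
        simp [pvVowels] at hv; exact hv
      obtain ⟨h1, h2, h3, h4, h5⟩ := hne
      simp [pvALoop, hv, ih c hc, h1, h2, h3, h4, h5]

-- ===== VERDICT (by name: the statement is the Claim_ definition above) =====
theorem three_vowels_exist_spec : Claim_equal_three_vowels_exist := by
  intro input _
  show three_vowels_exist input = three_vowels_exist_alt input
  simp only [three_vowels_exist, three_vowels_exist_alt,
    pvALoop_eq input.toList 0 (by omega), PySem.Str.count_eq]
  have hs : (String.toList "aeiou") = ['a', 'e', 'i', 'o', 'u'] := rfl
  simp only [hs, List.map_cons, List.map_nil, List.sum_cons, List.sum_nil]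
  have h1 : ∀ v : Char, (String.ofList [v]).toList = [v] := by intro v; simp
  simp only [h1, count_singleton]
  rw [decide_eq_decide]
  push_cast
  omega
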